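-- pv_equiv track=rewrite | github.com/FelixFelicis555/6-Sem | dm/test3/lab1_apriori_test.py | get__candidateset
-- ===== SOURCE A (Python) =====
-- import itertools
--
-- def get__candidateset(prev, curr):
--     n1 = len(curr[0])-1
--     purened = []
--     for i in range(len(curr)):
--         subset = findsubsets(curr[i], n1)
--         T = [False for i in range(len(subset))]
--         for j in range(len(subset)):
--             g = list(subset[j])
--             for item in prev:
--                 flag = True
--                 for k in g:
--                     if k not in item:
--                         flag = False
--                         break
--                 if flag:
--                     T[j] = True
--         if False not in T:
--             purened.append(curr[i])
--     return purened
--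
-- def findsubsets(s, n):
--     return list(itertools.combinations(s, n))
-- ===== SOURCE B (Python) =====
-- import itertools
--
-- def get__candidateset(prev, curr):
--     n1 = len(curr[0]) - 1
--     # inverted index: element -> set of indices of prev itemsets containing it
--     index = {}
--     for i, item in enumerate(prev):
--         for e in item:
--             s = index.get(e, set())
--             s.add(i)
--             index[e] = s
--     all_idx = set(range(len(prev)))
--     def covered(g):
--         s = all_idx
--         for e in g:
--             s = s & index.get(e, set())
--         return len(s) > 0
--     return [c for c in curr if all(covered(g) for g in itertools.combinations(c, n1))]
-- ===== Notes on version B (the rewrite author's own statement) =====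
-- stated objective: alternative
-- what changed: Instead of rescanning all of prev for every (k-1)-subset of every candidate, B builds an inverted index (element -> set of prev indices containing it) once and decides each subset by intersecting the index sets of its elements, keeping a candidate iff every such intersection is non-empty.
import Mathlib
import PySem

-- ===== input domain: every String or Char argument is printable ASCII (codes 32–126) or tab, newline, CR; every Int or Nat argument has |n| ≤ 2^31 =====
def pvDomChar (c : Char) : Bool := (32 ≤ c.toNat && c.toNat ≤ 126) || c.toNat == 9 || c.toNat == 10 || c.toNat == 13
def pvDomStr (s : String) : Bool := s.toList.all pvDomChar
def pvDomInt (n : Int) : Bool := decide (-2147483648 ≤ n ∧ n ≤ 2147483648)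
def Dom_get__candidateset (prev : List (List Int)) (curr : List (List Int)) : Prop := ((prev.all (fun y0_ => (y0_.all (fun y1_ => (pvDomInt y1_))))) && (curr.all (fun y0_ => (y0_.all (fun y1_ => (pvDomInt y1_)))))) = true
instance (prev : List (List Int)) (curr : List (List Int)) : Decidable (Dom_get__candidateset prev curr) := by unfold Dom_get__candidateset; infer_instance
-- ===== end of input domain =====

-- B replaces A's per-subset rescans of prev with an inverted index built once plus set intersections (objective: alternative data structure).

-- ===== PORT A =====
-- findsubsets(s, n) = list(itertools.combinations(s, n))
def pvFindsubsets (s : List Int) (n : Nat) : List (List Int) :=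
  PySem.List.combinations s n

def get__candidateset (prev : List (List Int)) (curr : List (List Int)) : List (List Int) :=
  let n1 : Int := ((curr.headD []).length : Int) - 1   -- len(curr[0]) - 1; Pre_ excludes curr = [] (IndexError) and n1 < 0 (ValueError)
  curr.foldl (fun purened c =>
    let subset := pvFindsubsets c n1.toNat
    let T := subset.map (fun g =>
      prev.foldl (fun t item => if g.all (fun k => item.contains k) then true else t) false)
    if T.contains false = false then purened ++ [c] else purened) []

-- ===== PORT B =====
-- the inverted-index build loop of Source B
def pvBuildIndex (prev : List (List Int)) : PySem.Dict Int (PySem.Set Int) :=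
  (PySem.List.enumerate prev).foldl (fun d p =>
    p.2.foldl (fun d e => d.insert e (PySem.Set.add (d.getD e []) p.1)) d) PySem.Dict.empty

-- covered(g): intersect the index sets of g's elements, starting from all prev indices; len(s) > 0
def pvCovered (index : PySem.Dict Int (PySem.Set Int)) (allIdx : PySem.Set Int) (g : List Int) : Bool :=
  decide (0 < (g.foldl (fun s e => PySem.Set.inter s (index.getD e [])) allIdx).length)

def get__candidateset_alt (prev : List (List Int)) (curr : List (List Int)) : List (List Int) :=
  let n1 : Int := ((curr.headD []).length : Int) - 1
  let index := pvBuildIndex prev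
  let allIdx : PySem.Set Int := PySem.Set.ofList (PySem.List.pyRange 0 prev.length 1)
  curr.filter (fun c => (PySem.List.combinations c n1.toNat).all (fun g => pvCovered index allIdx g))

-- ===== PRECONDITION & SPEC =====
-- A raises IndexError on curr = [] (it reads curr[0]) and ValueError when curr[0] = [] (combinations with n = -1); those inputs are excluded.
def Pre_get__candidateset (prev : List (List Int)) (curr : List (List Int)) : Prop :=
  curr ≠ [] ∧ curr.headD [] ≠ []
instance (prev : List (List Int)) (curr : List (List Int)) : Decidable (Pre_get__candidateset prev curr) := by unfold Pre_get__candidateset; infer_instance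

def pvWitness_get__candidateset : List (List Int) × List (List Int) :=
  ([[1], [2]], [[1, 2], [1, 3]])

def Spec_get__candidateset (prev : List (List Int)) (curr : List (List Int)) (out : List (List Int)) : Prop := out = get__candidateset_alt prev curr
instance (prev : List (List Int)) (curr : List (List Int)) (out : List (List Int)) : Decidable (Spec_get__candidateset prev curr out) := by unfold Spec_get__candidateset; infer_instance

-- ===== CLAIM (what is proved, stated in full; the proofs are below) =====
def Claim_equal_get__candidateset : Prop := ∀ (prev : List (List Int)) (curr : List (List Int)), Dom_get__candidateset prev curr → Pre_get__candidateset prev curr → Spec_get__candidateset prev curr (get__candidateset prev curr)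

-- ===== LEMMAS AND PROOFS =====

-- inner index-build loop over one itemset with index j
theorem pv_mem_inner_fold (item : List Int) (j : Int) (d : PySem.Dict Int (PySem.Set Int)) (e i : Int) :
    i ∈ (item.foldl (fun d e' => d.insert e' (PySem.Set.add (d.getD e' []) j)) d).getD e [] ↔
      i ∈ d.getD e [] ∨ (e ∈ item ∧ i = j) := by
  induction item generalizing d with
  | nil => simp
  | cons a t ih =>
    simp only [List.foldl_cons, ih, PySem.Dict.getD_insert, List.mem_cons]
    by_cases h : e = a
    · subst h
      simp [PySem.Set.mem_add]
      tauto
    · simp [h]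

-- outer index-build loop over (index, itemset) pairs
theorem pv_mem_outer_fold (pairs : List (Int × List Int)) (d : PySem.Dict Int (PySem.Set Int)) (e i : Int) :
    i ∈ (pairs.foldl (fun d p => p.2.foldl (fun d e' => d.insert e' (PySem.Set.add (d.getD e' []) p.1)) d) d).getD e [] ↔
      i ∈ d.getD e [] ∨ ∃ p ∈ pairs, i = p.1 ∧ e ∈ p.2 := by
  induction pairs generalizing d with
  | nil => simp
  | cons q t ih =>
    simp only [List.foldl_cons, ih, pv_mem_inner_fold, List.mem_cons]
    constructor
    · rintro ((h | ⟨he, hi⟩) | ⟨p, hp, hi, he⟩)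
      · exact Or.inl h
      · exact Or.inr ⟨q, Or.inl rfl, hi, he⟩
      · exact Or.inr ⟨p, Or.inr hp, hi, he⟩
    · rintro (h | ⟨p, (rfl | hp), hi, he⟩)
      · exact Or.inl (Or.inl h)
      · exact Or.inl (Or.inr ⟨he, hi⟩)
      · exact Or.inr ⟨p, hp, hi, he⟩

theorem pv_mem_buildIndex (prev : List (List Int)) (e i : Int) :
    i ∈ (pvBuildIndex prev).getD e [] ↔ ∃ k : Nat, ∃ _ : k < prev.length, i = (k : Int) ∧ e ∈ prev[k] := by
  unfold pvBuildIndex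
  rw [pv_mem_outer_fold]
  simp only [PySem.Dict.getD_empty, List.not_mem_nil, false_or]
  constructor
  · rintro ⟨p, hp, hi, he⟩
    rw [PySem.List.mem_enumerate_iff] at hp
    obtain ⟨k, hk, rfl⟩ := hp
    exact ⟨k, hk, by simpa using hi, he⟩
  · rintro ⟨k, hk, hi, he⟩
    refine ⟨((k : Int), prev[k]), ?_, by simpa using hi, he⟩
    rw [PySem.List.mem_enumerate_iff]
    exact ⟨k, hk, by simp⟩

theorem pv_mem_inter_fold (g : List Int) (s0 : List Int) (f : Int → List Int) (i : Int) :
    i ∈ g.foldl (fun s e => PySem.Set.inter s (f e)) s0 ↔ i ∈ s0 ∧ ∀ e ∈ g, i ∈ f e := by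
  induction g generalizing s0 with
  | nil => simp
  | cons a t ih =>
    simp only [List.foldl_cons, ih, PySem.Set.mem_inter, List.mem_cons]
    aesop

theorem pv_map_contains_false {α : Type} (l : List α) (f : α → Bool) :
    decide ((l.map f).contains false = false) = l.all f := by
  induction l with
  | nil => simp
  | cons a t ih => cases h : f a <;> simp_all

theorem pv_cond_eq (prev : List (List Int)) (g : List Int) :
    prev.any (fun item => g.all (fun k => item.contains k)) =
      pvCovered (pvBuildIndex prev) (PySem.Set.ofList (PySem.List.pyRange 0 prev.length 1)) g := by
  rw [Bool.eq_iff_iff]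
  unfold pvCovered
  rw [decide_eq_true_iff, List.length_pos_iff_exists_mem]
  constructor
  · intro h
    obtain ⟨item, hmem, hall⟩ := List.any_eq_true.mp h
    obtain ⟨k, hk, rfl⟩ := List.mem_iff_getElem.mp hmem
    refine ⟨(k : Int), (pv_mem_inter_fold _ _ _ _).mpr ⟨?_, ?_⟩⟩
    · rw [PySem.Set.mem_ofList, PySem.List.mem_pyRange_one]
      exact ⟨by positivity, by exact_mod_cast hk⟩
    · intro e he
      rw [pv_mem_buildIndex]
      exact ⟨k, hk, rfl, by simpa using List.all_eq_true.mp hall e he⟩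
  · rintro ⟨i, hi⟩
    rw [pv_mem_inter_fold] at hi
    obtain ⟨hrange, hall⟩ := hi
    rw [PySem.Set.mem_ofList, PySem.List.mem_pyRange_one] at hrange
    obtain ⟨h0, hlt⟩ := hrange
    lift i to ℕ using h0 with k0
    have hk0 : k0 < prev.length := by exact_mod_cast hlt
    refine List.any_eq_true.mpr ⟨prev[k0], List.getElem_mem _, List.all_eq_true.mpr ?_⟩
    intro e he
    obtain ⟨k, hk, hik, he'⟩ := (pv_mem_buildIndex prev e _).mp (hall e he)
    have hkk : k = k0 := by exact_mod_cast hik.symm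
    subst hkk
    simpa using he'

-- ===== VERDICT (by name: the statement is the Claim_ definition above) =====
theorem get__candidateset_spec : Claim_equal_get__candidateset := by
  unfold Claim_equal_get__candidateset
  intro prev curr _ _
  unfold Spec_get__candidateset get__candidateset get__candidateset_alt pvFindsubsets
  rw [PySem.List.foldl_append_ite_eq_filter]
  rw [List.nil_append]
  refine List.filter_congr (fun c _ => ?_)
  simp only [PySem.List.foldl_if_true_eq, Bool.false_or]
  rw [pv_map_contains_false]
  simp only [pv_cond_eq]
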